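-- pv_equiv track=rewrite | github.com/li3b33/kedro | olympicskedro/src/olympicskedro/pipelines/pattern_analysis/nodes.py | recommend_best_algorithm
-- ===== SOURCE A (Python) =====
-- from typing import Dict, List
--
-- def recommend_best_algorithm(cluster_analyses: Dict) -> str:
--     """Recomienda el mejor algoritmo basado en el análisis"""
--     if not cluster_analyses:
--         return "No hay algoritmos para comparar"
--
--     # Evaluar basado en interpretabilidad y características
--     scores = {}
--
--     for algo, analysis in cluster_analyses.items():
--         score = 0
--
--         # Puntos por interpretaciones semánticas
--         if 'interpretation' in analysis:
--             score += len(analysis['interpretation']) * 2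
--
--         # Puntos por análisis detallado
--         if 'cluster_stats' in analysis:
--             score += 3
--
--         # Puntos por identificación de ruido (DBSCAN)
--         if algo == 'dbscan' and 'noise_points' in analysis:
--             score += 2
--
--         scores[algo] = score
--
--     best_algo = max(scores, key=scores.get) if scores else "kmeans"
--     return str(best_algo)
-- ===== SOURCE B (Python) =====
-- def recommend_best_algorithm(cluster_analyses):
--     """Recomienda el mejor algoritmo basado en el analisis.
--     Sort-then-pick: rank all algorithms by score with a stable descending
--     sort and take the head; no scores dict, no max()/running-max scan.
--     Python's sorted(reverse=True) is stable, so among equal scores the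
--     first key in insertion order comes first, matching max's tie-break."""
--     if not cluster_analyses:
--         return "No hay algoritmos para comparar"
--
--     def score(algo, analysis):
--         s = 0
--         if 'interpretation' in analysis:
--             s += len(analysis['interpretation']) * 2
--         if 'cluster_stats' in analysis:
--             s += 3
--         if algo == 'dbscan' and 'noise_points' in analysis:
--             s += 2
--         return s
--
--     ranked = sorted(cluster_analyses.items(),
--                     key=lambda kv: score(kv[0], kv[1]),
--                     reverse=True)
--     return str(ranked[0][0])
-- ===== Notes on version B (the rewrite author's own statement) =====
-- stated objective: alternative
-- what changed: Replaces build-scores-dict-then-max(scores, key=scores.get) by a sort-based selection: rank the items with a stable descending sort on the same score and return the head (stability preserves max's first-wins tie-break); Pre_ excludes association lists with duplicate top-level keys, which no Python dict argument can have.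
import Mathlib
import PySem

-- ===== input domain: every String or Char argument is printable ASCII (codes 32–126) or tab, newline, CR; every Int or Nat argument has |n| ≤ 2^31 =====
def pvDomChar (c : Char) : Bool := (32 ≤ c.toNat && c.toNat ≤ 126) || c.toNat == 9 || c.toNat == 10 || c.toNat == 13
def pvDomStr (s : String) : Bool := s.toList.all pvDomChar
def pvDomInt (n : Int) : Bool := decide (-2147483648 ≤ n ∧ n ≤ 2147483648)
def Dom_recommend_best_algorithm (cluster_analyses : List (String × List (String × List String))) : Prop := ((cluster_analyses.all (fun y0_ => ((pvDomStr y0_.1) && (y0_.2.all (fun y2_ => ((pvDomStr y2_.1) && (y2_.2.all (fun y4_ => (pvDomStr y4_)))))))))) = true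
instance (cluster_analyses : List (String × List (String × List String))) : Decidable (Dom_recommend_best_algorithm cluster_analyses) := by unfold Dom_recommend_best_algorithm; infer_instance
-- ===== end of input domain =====

-- B replaces A's build-a-scores-dict-then-max selection by a stable descending sort of the
-- items on the same score followed by taking the head; objective: alternative (same result,
-- sort-based selection instead of a max scan).

-- ===== PORT A =====
-- the score block of A: interpretation*2, +3 for cluster_stats, +2 for dbscan noise_points
def pvScore (algo : String) (analysis : List (String × List String)) : Int :=
  let score : Int := 0
  let score := if (PySem.Dict.mk analysis).contains "interpretation"
               then score + (((PySem.Dict.mk analysis).getD "interpretation" []).length : Int) * 2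
               else score
  let score := if (PySem.Dict.mk analysis).contains "cluster_stats" then score + 3 else score
  if algo == "dbscan" && (PySem.Dict.mk analysis).contains "noise_points" then score + 2 else score

def recommend_best_algorithm (cluster_analyses : List (String × List (String × List String))) : String :=
  if cluster_analyses = [] then "No hay algoritmos para comparar"
  else
    let scores : PySem.Dict String Int :=
      cluster_analyses.foldl (fun d p => d.insert p.1 (pvScore p.1 p.2)) PySem.Dict.empty
    -- max(scores, key=scores.get) if scores else "kmeans": max? is none exactly when scores is empty;
    -- every key is present in scores, so scores.get k is its value (getD with an unused default)
    match PySem.List.max? scores.keys (fun k => scores.getD k 0) with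
    | some best => best          -- str(best_algo) on a str is the identity
    | none => "kmeans"

-- ===== PORT B =====
def recommend_best_algorithm_alt (cluster_analyses : List (String × List (String × List String))) : String :=
  if cluster_analyses = [] then "No hay algoritmos para comparar"
  else
    let ranked := PySem.List.sorted cluster_analyses (fun kv => pvScore kv.1 kv.2) true
    -- ranked[0][0]; ranked is a permutation of a nonempty list, so the head exists
    match ranked with
    | p :: _ => p.1
    | [] => ""                   -- unreachable (sorted of a nonempty list is nonempty)

-- ===== PRECONDITION & SPEC =====
-- Pre_ excludes association lists with duplicate top-level keys: a Python dict argument cannot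
-- contain them, so they are an artefact of the List encoding (A's dict overwrites in place,
-- B's sort sees both occurrences).
def Pre_recommend_best_algorithm (cluster_analyses : List (String × List (String × List String))) : Prop :=
  (cluster_analyses.map Prod.fst).Nodup
instance (cluster_analyses : List (String × List (String × List String))) : Decidable (Pre_recommend_best_algorithm cluster_analyses) := by unfold Pre_recommend_best_algorithm; infer_instance

def pvWitness_recommend_best_algorithm : (List (String × List (String × List String))) :=
  [("kmeans", [("interpretation", ["a", "b"]), ("cluster_stats", [])]),
   ("dbscan", [("noise_points", []), ("interpretation", ["x"])])]

def Spec_recommend_best_algorithm (cluster_analyses : List (String × List (String × List String))) (out : String) : Prop := out = recommend_best_algorithm_alt cluster_analyses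
instance (cluster_analyses : List (String × List (String × List String))) (out : String) : Decidable (Spec_recommend_best_algorithm cluster_analyses out) := by unfold Spec_recommend_best_algorithm; infer_instance

-- ===== CLAIM (what is proved, stated in full; the proofs are below) =====
def Claim_equal_recommend_best_algorithm : Prop := ∀ (cluster_analyses : List (String × List (String × List String))), Dom_recommend_best_algorithm cluster_analyses → Pre_recommend_best_algorithm cluster_analyses → Spec_recommend_best_algorithm cluster_analyses (recommend_best_algorithm cluster_analyses)

-- ===== LEMMAS AND PROOFS =====

-- the running-max fold (first-wins: strict <) as a named recursion, used to relate both ports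
def pvFold {α : Type} (key : α → Int) : List α → Option α → Option α
  | [], acc => acc
  | x :: t, none => pvFold key t (some x)
  | x :: t, some m => pvFold key t (if key m < key x then some x else some m)

-- PySem.List.max? is exactly pvFold started from none
theorem pv_max?_eq_pvFold {α : Type} (key : α → Int) (xs : List α) :
    PySem.List.max? xs key = pvFold key xs none := by
  rw [PySem.List.max?]
  suffices h : ∀ acc, List.foldl
      (fun acc x =>
        @PySem.List.min2?.match_1 α (fun _ => Option α) acc (fun _ => some x)
          (fun m => if key m < key x then some x else some m)) acc xs = pvFold key xs acc from h none
  induction xs with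
  | nil => intro acc; rfl
  | cons x t ih =>
    intro acc
    cases acc with
    | none => simp only [List.foldl_cons]; exact ih _
    | some m => simp only [List.foldl_cons]; exact ih _

-- pvFold never returns to none once the accumulator is some
theorem pvFold_some {α : Type} (key : α → Int) (l : List α) (m : α) :
    ∃ r, pvFold key l (some m) = some r := by
  induction l generalizing m with
  | nil => exact ⟨m, rfl⟩
  | cons x t ih =>
    simp only [pvFold]
    split <;> exact ih _

-- A's side: pvFold over the projected keys, with a lookup g agreeing with the pair score,
-- is pvFold over the pairs, projected
theorem pvFold_map (g : String → Int) (sc : String × List (String × List String) → Int)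
    (l : List (String × List (String × List String)))
    (acc : Option (String × List (String × List String)))
    (hl : ∀ p ∈ l, g p.1 = sc p) (hacc : ∀ m, acc = some m → g m.1 = sc m) :
    pvFold g (l.map Prod.fst) (acc.map Prod.fst) = (pvFold sc l acc).map Prod.fst := by
  induction l generalizing acc with
  | nil => rfl
  | cons p t ih =>
    have hp : g p.1 = sc p := hl p (List.mem_cons_self ..)
    have ht : ∀ q ∈ t, g q.1 = sc q := fun q hq => hl q (List.mem_cons_of_mem _ hq)
    cases acc with
    | none =>
      simp only [List.map_cons, Option.map_none, pvFold]
      exact ih (some p) ht (fun m hm => by cases hm; exact hp)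
    | some m =>
      have hm : g m.1 = sc m := hacc m rfl
      simp only [List.map_cons, Option.map_some, pvFold, hp, hm]
      by_cases h : sc m < sc p
      · simp only [h, if_pos]
        exact ih (some p) ht (fun q hq => by cases hq; exact hp)
      · simp only [if_neg h]
        exact ih (some m) ht (fun q hq => by cases hq; exact hm)

-- head of an insertBy (descending comparator) = max-step of the old head and the new element
theorem pv_head_insertBy {α : Type} (key : α → Int) (x : α) (l : List α) :
    (PySem.List.insertBy (fun a b => decide (key b < key a)) x l).head? =
      (match l.head? with
       | none => some x
       | some y => if key y < key x then some x else some y) := by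
  cases l with
  | nil => rfl
  | cons y ys =>
    simp only [PySem.List.insertBy, List.head?_cons]
    by_cases h : key y < key x
    · simp [h]
    · simp [h]

-- the head of the stable descending-sort fold is exactly the running-max fold
theorem pv_head_sorted_fold {α : Type} (key : α → Int) (xs : List α) (acc : List α) :
    (xs.foldl (fun acc x => PySem.List.insertBy (fun a b => decide (key b < key a)) x acc) acc).head? =
      pvFold key xs acc.head? := by
  induction xs generalizing acc with
  | nil => rfl
  | cons x t ih =>
    simp only [List.foldl_cons]
    rw [ih, pv_head_insertBy]
    cases acc with
    | nil => rfl
    | cons y ys => rfl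

-- head of sorted(xs, key, reverse=True) = max?(xs, key): the stable reverse sort puts the
-- FIRST maximal element in front, which is exactly Python's max tie-break
theorem pv_head_sorted_rev_eq_pvFold {α : Type} (key : α → Int) (xs : List α) :
    (PySem.List.sorted xs key true).head? = pvFold key xs none := by
  rw [PySem.List.sorted_rev_eq_foldl_insertBy]
  exact pv_head_sorted_fold key xs []

-- ===== VERDICT (by name: the statement is the Claim_ definition above) =====
theorem recommend_best_algorithm_spec : Claim_equal_recommend_best_algorithm := by
  intro xs _ hpre
  unfold Spec_recommend_best_algorithm
  unfold recommend_best_algorithm recommend_best_algorithm_alt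
  by_cases hnil : xs = []
  · simp [hnil]
  · simp only [if_neg hnil]
    set pairs : List (String × Int) := xs.map (fun p => (p.1, pvScore p.1 p.2)) with hpairs
    set scores : PySem.Dict String Int :=
      xs.foldl (fun d p => d.insert p.1 (pvScore p.1 p.2)) PySem.Dict.empty with hscores
    have hitems : scores.items = pairs := by
      rw [hscores, PySem.Dict.items_foldl_insert_fresh xs Prod.fst (fun p => pvScore p.1 p.2)
            PySem.Dict.empty (fun a _ => by simp [pysem]) hpre]
      simp [hpairs, PySem.Dict.empty]
    have hkeys : scores.keys = xs.map Prod.fst := by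
      have : pairs.map Prod.fst = xs.map Prod.fst := by
        simp [hpairs, List.map_map, Function.comp]
      simp only [PySem.Dict.keys, hitems, this]
    have hnodup : scores.keys.Nodup := by rw [hkeys]; exact hpre
    have hg : ∀ p ∈ xs, scores.getD p.1 0 = pvScore p.1 p.2 := by
      intro p hp
      have : (p.1, pvScore p.1 p.2) ∈ scores.items := by
        rw [hitems, hpairs]; exact List.mem_map_of_mem hp
      exact PySem.Dict.getD_of_mem_items scores this hnodup 0
    -- A's max? over the keys = pvFold over xs with the score key, projected to keys
    have hA : PySem.List.max? scores.keys (fun k => scores.getD k 0)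
        = (pvFold (fun p => pvScore p.1 p.2) xs none).map Prod.fst := by
      rw [pv_max?_eq_pvFold, hkeys]
      simpa only [Option.map_none] using
        pvFold_map (fun k => scores.getD k 0) (fun p => pvScore p.1 p.2) xs none hg
          (fun m hm => by cases hm)
    -- B's sorted head = the same pvFold
    have hB := pv_head_sorted_rev_eq_pvFold
      (fun p : String × List (String × List String) => pvScore p.1 p.2) xs
    -- xs nonempty, so the fold is some
    obtain ⟨p, t, hx⟩ : ∃ p t, xs = p :: t := by
      cases xs with
      | nil => exact absurd rfl hnil
      | cons p t => exact ⟨p, t, rfl⟩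
    obtain ⟨m, hm⟩ : ∃ m, pvFold (fun p => pvScore p.1 p.2) xs none = some m := by
      rw [hx]; exact pvFold_some _ t p
    rw [hA, hm]
    rw [hm] at hB
    cases hsort : PySem.List.sorted xs (fun kv => pvScore kv.1 kv.2) true with
    | nil => rw [hsort] at hB; simp at hB
    | cons q r =>
      rw [hsort] at hB
      simp only [List.head?_cons, Option.some.injEq] at hB
      simp [hB]
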